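-- pv_equiv track=rewrite | github.com/cjy0826/echo-app | dedupe.py | dedupe_header
-- ===== SOURCE A (Python) =====
-- from collections import defaultdict
-- from typing import List
--
-- def dedupe_header(columns: List[str]) -> List[str]:
--     seen_counts = defaultdict(int)
--     result: List[str] = []
--
--     for col in columns:
--         count = seen_counts[col]
--         if count == 0:
--             result.append(col)
--         else:
--             result.append(f"{col}.{count}")
--         seen_counts[col] += 1
--
--     return result
-- ===== SOURCE B (Python) =====
-- from typing import List
--
-- def dedupe_header(columns: List[str]) -> List[str]:
--     # Group-and-scatter: first index all positions per column name,
--     # then write each group's renamed headers into a preallocated output.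
--     positions = {}
--     for i, col in enumerate(columns):
--         positions.setdefault(col, []).append(i)
--     out = [""] * len(columns)
--     for col, idxs in positions.items():
--         for k, i in enumerate(idxs):
--             out[i] = col if k == 0 else f"{col}.{k}"
--     return out
-- ===== Notes on version B (the rewrite author's own statement) =====
-- stated objective: alternative
-- what changed: Replaces the single left-to-right pass with a running count dict by a two-phase group-and-scatter: phase one builds an index of all positions per column name, phase two writes each group's renamed headers (suffix = rank within the group) out of order into a preallocated output list.
import Mathlib
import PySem

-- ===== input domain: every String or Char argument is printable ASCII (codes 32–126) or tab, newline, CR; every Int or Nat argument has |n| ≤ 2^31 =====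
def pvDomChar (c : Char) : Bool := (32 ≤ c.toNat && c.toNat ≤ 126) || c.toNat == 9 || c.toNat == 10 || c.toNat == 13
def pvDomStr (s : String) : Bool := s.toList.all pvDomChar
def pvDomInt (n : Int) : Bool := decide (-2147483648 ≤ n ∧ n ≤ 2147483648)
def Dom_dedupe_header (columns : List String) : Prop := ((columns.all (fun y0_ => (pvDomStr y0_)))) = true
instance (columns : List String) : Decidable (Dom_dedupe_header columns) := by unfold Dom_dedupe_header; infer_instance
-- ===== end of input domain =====

-- B replaces A's single pass with a running count dict by a two-phase group-and-scatter
-- (index all positions per name, then write each group's renamed headers out of order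
-- into a preallocated output); objective: alternative algorithm, not faster.

-- ===== PORT A =====
-- A: one fold over columns carrying (seen_counts : dict, result : list)
def dedupe_header (columns : List String) : List String :=
  (columns.foldl
    (fun (st : PySem.Dict String Int × List String) col =>
      let count := st.1.getD col 0
      let result := if count == 0 then st.2 ++ [col]
                    else st.2 ++ [col ++ "." ++ PySem.Int.toStr count]
      (st.1.insert col (count + 1), result))
    (PySem.Dict.empty, [])).2

-- ===== PORT B =====
-- B: phase 1 groups positions per name (positions.setdefault(col, []).append(i) ≡ modify col [] (· ++ [i]));
--    phase 2 scatters each group's renamed headers into out (out[i] = … ≡ pySetD; every i is in range).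
def dedupe_header_alt (columns : List String) : List String :=
  let positions : PySem.Dict String (List Int) :=
    (PySem.List.enumerate columns).foldl
      (fun d p => d.modify p.2 [] (fun l => l ++ [p.1])) PySem.Dict.empty
  let out := List.replicate columns.length ""
  positions.items.foldl
    (fun out g =>
      (PySem.List.enumerate g.2).foldl
        (fun o q => PySem.List.pySetD o q.2
          (if q.1 == 0 then g.1 else g.1 ++ "." ++ PySem.Int.toStr q.1))
        out)
    out

-- ===== PRECONDITION & SPEC =====
def Spec_dedupe_header (columns : List String) (out : List String) : Prop := out = dedupe_header_alt columns
instance (columns : List String) (out : List String) : Decidable (Spec_dedupe_header columns out) := by unfold Spec_dedupe_header; infer_instance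

-- ===== CLAIM (what is proved, stated in full; the proofs are below) =====
def Claim_equal_dedupe_header : Prop := ∀ (columns : List String), Dom_dedupe_header columns → Spec_dedupe_header columns (dedupe_header columns)

-- ===== LEMMAS AND PROOFS =====

-- the intended name at position j: count of earlier occurrences decides the suffix
def pvName (cols : List String) (j : Nat) : String :=
  if (cols.take j).count (cols.getD j "") = 0 then cols.getD j ""
  else cols.getD j "" ++ "." ++ PySem.Int.toStr (((cols.take j).count (cols.getD j "") : Nat) : Int)

-- A-side reference recursion, with 'pre' the already-processed prefix
def pvSpecGo : List String → List String → List String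
  | _, [] => []
  | pre, c :: rest =>
    (if PySem.List.count pre c == 0 then c
     else c ++ "." ++ PySem.Int.toStr ((PySem.List.count pre c : Nat) : Int)) :: pvSpecGo (pre ++ [c]) rest

lemma foldA (rest : List String) : ∀ (pre : List String) (d : PySem.Dict String Int) (acc : List String),
    (∀ c, d.getD c 0 = ((PySem.List.count pre c : Nat) : Int)) →
    (rest.foldl
      (fun (st : PySem.Dict String Int × List String) col =>
        let count := st.1.getD col 0
        let result := if count == 0 then st.2 ++ [col]
                      else st.2 ++ [col ++ "." ++ PySem.Int.toStr count]
        (st.1.insert col (count + 1), result))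
      (d, acc)).2 = acc ++ pvSpecGo pre rest := by
  induction rest with
  | nil => intro pre d acc _; simp [pvSpecGo]
  | cons c rest ih =>
    intro pre d acc h
    simp only [List.foldl_cons]
    rw [ih (pre ++ [c])]
    · have hc : d.getD c 0 = ((PySem.List.count pre c : Nat) : Int) := h c
      simp only [hc, pvSpecGo, PySem.List.count_eq]
      by_cases h0 : List.count c pre = 0
      · simp [h0]
      · simp [h0]
    · intro c'
      by_cases hcc : c' = c
      · rw [hcc, PySem.Dict.getD_insert_self, h c]
        simp [PySem.List.count_eq, List.count_append]
      · rw [PySem.Dict.getD_insert, if_neg hcc, h c']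
        simp [PySem.List.count_eq, List.count_append, Ne.symm hcc]

lemma specGo_eq_map (rest : List String) : ∀ (pre : List String),
    pvSpecGo pre rest = (List.range rest.length).map (fun m => pvName (pre ++ rest) (pre.length + m)) := by
  induction rest with
  | nil => intro pre; simp [pvSpecGo]
  | cons c rest ih =>
    intro pre
    rw [pvSpecGo, List.length_cons, List.range_succ_eq_map, List.map_cons, List.map_map]
    congr 1
    case _ =>
      have hget : (pre ++ c :: rest).getD pre.length "" = c := by
        rw [List.getD_append_right _ _ _ _ (le_refl _)]
        simp
      have htake : (pre ++ c :: rest).take pre.length = pre := List.take_left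
      simp only [pvName, Nat.add_zero, hget, htake, PySem.List.count_eq]
      by_cases h0 : List.count c pre = 0 <;> simp [h0]
    case _ =>
      rw [ih (pre ++ [c])]
      apply List.map_congr_left
      intro m _
      simp only [Function.comp]
      congr 1
      · simp
      · simp [Nat.succ_eq_add_one]; omega

lemma dedupe_header_eq_map (columns : List String) :
    dedupe_header columns = (List.range columns.length).map (fun m => pvName columns m) := by
  unfold dedupe_header
  rw [foldA columns [] PySem.Dict.empty [] (fun c => by simp [PySem.List.count_eq])]
  rw [specGo_eq_map columns []]
  simp

-- ---- B side ----

-- the positions of value c in cols, as recorded by phase 1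
def pvIdxs (cols : List String) (c : String) : List Int :=
  ((PySem.List.enumerate cols).filter (fun q => q.2 == c)).map (fun q => q.1)

lemma pvIdxs_mem (cols : List String) (c : String) {i : Int} (h : i ∈ pvIdxs cols c) :
    0 ≤ i ∧ i.toNat < cols.length ∧ cols.getD i.toNat "" = c := by
  unfold pvIdxs at h
  obtain ⟨q, hq, rfl⟩ := List.mem_map.1 h
  have hf := List.mem_filter.1 hq
  obtain ⟨k, hk, rfl⟩ := (PySem.List.mem_enumerate_iff _ _ _).1 hf.1
  have hc : cols[k] = c := by simpa using hf.2
  refine ⟨by simp, by simp [hk], ?_⟩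
  simp only [zero_add, Int.toNat_natCast]
  rw [List.getD_eq_getElem _ _ hk, hc]
lemma pvIdxs_nodup (cols : List String) (c : String) : (pvIdxs cols c).Nodup := by
  unfold pvIdxs
  have hsub : ((PySem.List.enumerate cols).filter (fun q => q.2 == c)).map (fun q : Int × String => q.1)
      |>.Sublist ((PySem.List.enumerate cols).map (fun q : Int × String => q.1)) :=
    List.filter_sublist.map _
  apply hsub.nodup
  rw [PySem.List.map_fst_enumerate]
  rw [show ((0:Int) + (cols.length : Int)) = ((cols.length : Nat) : Int) by simp]
  rw [PySem.List.pyRange_zero_natCast]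
  exact List.nodup_range.map (fun a b => by omega)
lemma pvIdxs_rank (cols : List String) : ∀ (s : Int) (j : Nat) (c : String),
    j < cols.length → cols.getD j "" = c →
    (((PySem.List.enumerate cols s).filter (fun q => q.2 == c)).map (fun q : Int × String => q.1))[(cols.take j).count c]?
      = some (s + j) := by
  induction cols with
  | nil => intro s j c hj; simp at hj
  | cons x cols ih =>
    intro s j c hj hc
    rw [PySem.List.enumerate_cons, List.filter_cons]
    match j with
    | 0 =>
      have hx : x = c := by simpa using hc
      subst hx
      simp
    | j + 1 =>
      have hc' : cols.getD j "" = c := by simpa using hc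
      have hj' : j < cols.length := by simpa using hj
      have htail := ih (s + 1) j c hj' hc'
      by_cases hxc : x = c
      · subst hxc
        rw [if_pos (by simp), List.take_succ_cons, List.count_cons_self, List.map_cons,
          List.getElem?_cons_succ, htail]
        congr 1
        push_cast
        ring
      · rw [if_neg (by simpa using hxc)]
        rw [List.take_succ_cons, List.count_cons_of_ne hxc]
        rw [htail]
        congr 1
        push_cast
        ring
lemma positions_getD (columns : List String) (c : String) :
    (((PySem.List.enumerate columns).foldl
        (fun d p => d.modify p.2 [] (fun l => l ++ [p.1])) PySem.Dict.empty).getD c [])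
      = pvIdxs columns c := by
  have hswap : (PySem.List.enumerate columns).foldl
      (fun d p => d.modify p.2 [] (fun l => l ++ [p.1])) (PySem.Dict.empty : PySem.Dict String (List Int))
      = (((PySem.List.enumerate columns).map Prod.swap).foldl
          (fun d p => d.modify p.1 [] (fun l => l ++ [p.2])) PySem.Dict.empty) := by
    rw [List.foldl_map]
    rfl
  rw [hswap, PySem.Dict.getD_foldl_modify_append]
  unfold pvIdxs
  rw [List.filter_map]
  simp [PySem.Dict.getD_empty, List.map_map, Function.comp_def, Prod.swap]
lemma positions_items (columns : List String) :
    ((PySem.List.enumerate columns).foldl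
        (fun d p => d.modify p.2 [] (fun l => l ++ [p.1])) PySem.Dict.empty).items
      = (PySem.Set.ofList columns).map (fun c => (c, pvIdxs columns c)) := by
  have hkeys : ((PySem.List.enumerate columns).foldl
      (fun d p => d.modify p.2 [] (fun l => l ++ [p.1])) (PySem.Dict.empty : PySem.Dict String (List Int))).keys
      = PySem.Set.ofList columns := by
    rw [PySem.Dict.keys_foldl_modify_key (key := fun p : Int × String => p.2)
      (f := fun d p => (fun l => l ++ [p.1]))]
    rw [PySem.List.map_snd_enumerate]
    simp [PySem.Dict.keys_empty, PySem.Set.ofList, PySem.Set.update]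
  have hnd : ((PySem.List.enumerate columns).foldl
      (fun d p => d.modify p.2 [] (fun l => l ++ [p.1])) (PySem.Dict.empty : PySem.Dict String (List Int))).keys.Nodup := by
    rw [hkeys]; exact PySem.Set.nodup_ofList _
  rw [PySem.Dict.items_eq_map_keys _ hnd [], hkeys]
  apply List.map_congr_left
  intro c _
  rw [positions_getD]
lemma scat_len (f : Int → String) : ∀ (l : List (Int × Int)) (out : List String),
    (l.foldl (fun o q => PySem.List.pySetD o q.2 (f q.1)) out).length = out.length := by
  intro l
  induction l with
  | nil => intro out; rfl
  | cons q l ih => intro out; rw [List.foldl_cons, ih, PySem.List.length_pySetD]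
lemma scat_untouched (f : Int → String) (j : Nat) : ∀ (l : List (Int × Int)) (out : List String),
    (∀ q ∈ l, 0 ≤ q.2 ∧ q.2.toNat ≠ j) →
    (l.foldl (fun o q => PySem.List.pySetD o q.2 (f q.1)) out)[j]? = out[j]? := by
  intro l
  induction l with
  | nil => intro out _; rfl
  | cons q l ih =>
    intro out h
    rw [List.foldl_cons, ih _ (fun q hq => h q (List.mem_cons_of_mem _ hq))]
    obtain ⟨h0, hne⟩ := h q (List.mem_cons_self ..)
    rw [PySem.List.pySetD_of_nonneg _ _ h0, List.getElem?_set_ne hne]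
lemma scat_hit (f : Int → String) (j k : Nat) (idxs : List Int) (out : List String)
    (hnd : idxs.Nodup) (hpos : ∀ i ∈ idxs, 0 ≤ i) (hk : idxs[k]? = some (j : Int))
    (hj : j < out.length) :
    ((PySem.List.enumerate idxs).foldl (fun o q => PySem.List.pySetD o q.2 (f q.1)) out)[j]?
      = some (f (k : Int)) := by
  have hklen : k < idxs.length := by
    by_contra h
    rw [List.getElem?_eq_none (by omega)] at hk
    simp at hk
  have hkv : idxs[k] = (j : Int) := by
    rw [List.getElem?_eq_getElem hklen] at hk
    exact Option.some.inj hk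
  have hsplit : idxs = idxs.take k ++ idxs[k] :: idxs.drop (k + 1) := by
    rw [← List.drop_eq_getElem_cons hklen, List.take_append_drop]
  have hlen_take : (idxs.take k).length = k := by
    rw [List.length_take]; omega
  conv_lhs => rw [hsplit]
  rw [PySem.List.enumerate_append, List.foldl_append, PySem.List.enumerate_cons, List.foldl_cons]
  rw [scat_untouched]
  · rw [hkv, hlen_take]
    rw [PySem.List.pySetD_of_nonneg _ _ (by positivity)]
    simp only [Int.toNat_natCast, zero_add]
    rw [List.getElem?_set_self (by rw [scat_len]; exact hj)]
  · -- later writes in this group hit other indices (idxs has no duplicates)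
    intro q hq
    obtain ⟨m, hm, rfl⟩ := (PySem.List.mem_enumerate_iff _ _ _).1 hq
    have hm' : m < idxs.length - (k + 1) := by simpa using hm
    have hidx : (idxs.drop (k + 1))[m]'hm = idxs[k + 1 + m]'(by omega) := List.getElem_drop
    have hmem : idxs[k + 1 + m]'(by omega) ∈ idxs := List.getElem_mem _
    simp only [hidx]
    refine ⟨hpos _ hmem, ?_⟩
    have hne : idxs[k + 1 + m]'(by omega) ≠ idxs[k]'hklen := by
      intro he
      have := (List.Nodup.getElem_inj_iff hnd).1 he
      omega
    intro htn
    apply hne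
    rw [hkv]
    have hpos' : 0 ≤ idxs[k + 1 + m]'(by omega) := hpos _ hmem
    omega
lemma outer_len : ∀ (gs : List (String × List Int)) (out : List String),
    (gs.foldl (fun out g =>
      (PySem.List.enumerate g.2).foldl
        (fun o q => PySem.List.pySetD o q.2
          (if q.1 == 0 then g.1 else g.1 ++ "." ++ PySem.Int.toStr q.1)) out) out).length = out.length := by
  intro gs
  induction gs with
  | nil => intro out; rfl
  | cons g gs ih =>
    intro out
    rw [List.foldl_cons, ih, scat_len (f := fun k => if k == 0 then g.1 else g.1 ++ "." ++ PySem.Int.toStr k)]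
lemma outer_untouched (j : Nat) : ∀ (gs : List (String × List Int)) (out : List String),
    (∀ g ∈ gs, ∀ i ∈ g.2, 0 ≤ i ∧ i.toNat ≠ j) →
    (gs.foldl (fun out g =>
      (PySem.List.enumerate g.2).foldl
        (fun o q => PySem.List.pySetD o q.2
          (if q.1 == 0 then g.1 else g.1 ++ "." ++ PySem.Int.toStr q.1)) out) out)[j]? = out[j]? := by
  intro gs
  induction gs with
  | nil => intro out _; rfl
  | cons g gs ih =>
    intro out h
    rw [List.foldl_cons, ih _ (fun g' hg' => h g' (List.mem_cons_of_mem _ hg'))]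
    apply scat_untouched (f := fun k => if k == 0 then g.1 else g.1 ++ "." ++ PySem.Int.toStr k)
    intro q hq
    obtain ⟨m, hm, rfl⟩ := (PySem.List.mem_enumerate_iff _ _ _).1 hq
    exact h g (List.mem_cons_self ..) _ (List.getElem_mem _)
lemma dedupe_header_alt_eq_map (columns : List String) :
    dedupe_header_alt columns = (List.range columns.length).map (fun m => pvName columns m) := by
  unfold dedupe_header_alt
  simp only [positions_items]
  apply List.ext_getElem?
  intro j
  by_cases hj : j < columns.length
  case neg =>
    rw [List.getElem?_eq_none (l := (List.range columns.length).map _) (by simp; omega)]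
    rw [List.getElem?_eq_none]
    rw [outer_len, List.length_replicate]; omega
  case pos =>
    have hcm : columns.getD j "" ∈ columns := by
      rw [List.getD_eq_getElem _ _ hj]; exact List.getElem_mem _
    obtain ⟨L1, L2, hsp⟩ := List.append_of_mem ((PySem.Set.mem_ofList columns _).2 hcm)
    have hnd : (L1 ++ columns.getD j "" :: L2).Nodup := by
      rw [← hsp]; exact PySem.Set.nodup_ofList _
    have hcL2 : columns.getD j "" ∉ L2 := by
      have := (List.nodup_append.1 hnd).2.1
      simp at this; exact this.1
    rw [hsp, List.map_append, List.map_cons, List.foldl_append, List.foldl_cons]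
    rw [outer_untouched]
    · rw [scat_hit (f := fun k => if k == 0 then columns.getD j "" else columns.getD j "" ++ "." ++ PySem.Int.toStr k)
        (k := (columns.take j).count (columns.getD j ""))
        (hnd := pvIdxs_nodup columns _)
        (hpos := fun i hi => (pvIdxs_mem columns _ hi).1)
        (hk := by
          have := pvIdxs_rank columns 0 j (columns.getD j "") hj rfl
          unfold pvIdxs
          rw [this]; simp)
        (hj := by rw [outer_len, List.length_replicate]; exact hj)]
      rw [List.getElem?_map, List.getElem?_range hj]
      simp only [Option.map_some]
      unfold pvName
      simp [Int.natCast_eq_zero]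
    · -- other groups touch only positions holding a different name
      intro g hg i hi
      obtain ⟨c', hc', rfl⟩ := List.mem_map.1 hg
      obtain ⟨h0, hlt, hgd⟩ := pvIdxs_mem columns c' hi
      refine ⟨h0, fun he => ?_⟩
      rw [he] at hgd
      exact hcL2 (hgd ▸ hc')
-- ===== VERDICT (by name: the statement is the Claim_ definition above) =====
theorem dedupe_header_spec : Claim_equal_dedupe_header := by
  intro columns _
  unfold Spec_dedupe_header
  rw [dedupe_header_eq_map, dedupe_header_alt_eq_map]
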